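-- pv_equiv track=rewrite | github.com/pm2550/TPU_Models | tools/compare_theory_vs_envelope.py | per_k_groups
-- ===== SOURCE A (Python) =====
-- def per_k_groups(rows):
--     byk = {}
--     for r in rows:
--         try:
--             K = int(r.get('K') or 0)
--         except Exception:
--             K = 0
--         byk.setdefault(K, []).append(r)
--     # sort by group_index where possible
--     for K, lst in byk.items():
--         lst.sort(key=lambda x: int(x.get('group_index') or 0))
--     return byk
-- ===== SOURCE B (Python) =====
-- def per_k_groups(rows):
--     def kval(r):
--         try:
--             return int(r.get('K') or 0)
--         except Exception:
--             return 0
--     keys = []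
--     for r in rows:
--         k = kval(r)
--         if k not in keys:
--             keys.append(k)
--     return {k: sorted((r for r in rows if kval(r) == k),
--                       key=lambda x: int(x.get('group_index') or 0))
--             for k in keys}
-- ===== Notes on version B (the rewrite author's own statement) =====
-- stated objective: alternative
-- what changed: B drops the mutable dict-of-lists grouping entirely: one pass collects the distinct K values in first-appearance order, then a comprehension builds each group by filtering rows for that key and sorting it once (stable sort preserves original within-group order).
import Mathlib
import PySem

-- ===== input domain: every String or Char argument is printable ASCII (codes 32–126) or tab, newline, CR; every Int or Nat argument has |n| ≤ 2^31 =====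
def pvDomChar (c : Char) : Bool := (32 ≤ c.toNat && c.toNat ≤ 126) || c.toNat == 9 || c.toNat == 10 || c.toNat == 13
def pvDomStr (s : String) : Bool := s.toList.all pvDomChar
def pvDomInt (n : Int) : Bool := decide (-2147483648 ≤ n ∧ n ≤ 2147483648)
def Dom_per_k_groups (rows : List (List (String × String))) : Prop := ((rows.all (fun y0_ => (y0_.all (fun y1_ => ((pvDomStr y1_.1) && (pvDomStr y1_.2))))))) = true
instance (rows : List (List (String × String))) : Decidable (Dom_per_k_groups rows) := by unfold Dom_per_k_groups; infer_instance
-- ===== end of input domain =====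

-- B replaces A's mutable dict-of-lists grouping by a keys-then-filter decomposition: return-value
-- equivalence only — A sorts its group lists in place, B never mutates its input.

-- ===== PORT A =====

-- r.get(k): a Python row is a dict built from the association list (later duplicates win)
def pvRowGet (r : List (String × String)) (k : String) : Option String :=
  (PySem.Dict.ofList r).get? k

-- K = int(r.get('K') or 0), 0 on exception (the except branch makes this total)
def pvKval (r : List (String × String)) : Int :=
  match pvRowGet r "K" with
  | none => 0
  | some s => if s = "" then 0 else (PySem.Int.ofStr? s).getD 0

-- sort key int(x.get('group_index') or 0); Python RAISES when the string does not parse —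
-- those inputs are excluded by Pre_per_k_groups, so the .getD 0 is never reached there
def pvGval (r : List (String × String)) : Int :=
  match pvRowGet r "group_index" with
  | none => 0
  | some s => if s = "" then 0 else (PySem.Int.ofStr? s).getD 0

def per_k_groups (rows : List (List (String × String))) : List (Int × List (List (String × String))) :=
  -- byk.setdefault(K, []).append(r)  ==  byk[K] = byk.get(K, []) + [r]  ==  Dict.modify
  let byk : PySem.Dict Int (List (List (String × String))) :=
    rows.foldl (fun d r => d.modify (pvKval r) [] (fun l => l ++ [r])) PySem.Dict.empty
  -- for K, lst in byk.items(): lst.sort(key=...)  — sort each value in place; return byk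
  byk.items.map (fun p => (p.1, PySem.List.sorted p.2 pvGval false))

-- ===== PORT B =====

def per_k_groups_alt (rows : List (List (String × String))) : List (Int × List (List (String × String))) :=
  -- keys = []; for r in rows: k = kval(r); if k not in keys: keys.append(k)
  let keys : List Int :=
    rows.foldl (fun ks r => if pvKval r ∈ ks then ks else ks ++ [pvKval r]) []
  -- {k: sorted((r for r in rows if kval(r) == k), key=gval) for k in keys}
  keys.map (fun k =>
    (k, PySem.List.sorted (rows.filter (fun r => pvKval r == k)) pvGval false))

-- ===== PRECONDITION & SPEC =====
-- Pre_ excludes exactly the inputs where Python A raises ValueError: a row whose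
-- 'group_index' value is a non-empty string that int() cannot parse.
def Pre_per_k_groups (rows : List (List (String × String))) : Prop :=
  ∀ r ∈ rows, ((PySem.Dict.ofList r).get? "group_index").all
    (fun s => s == "" || (PySem.Int.ofStr? s).isSome) = true
instance (rows : List (List (String × String))) : Decidable (Pre_per_k_groups rows) := by
  unfold Pre_per_k_groups; infer_instance

def pvWitness_per_k_groups : (List (List (String × String))) :=
  [[("K", "2"), ("group_index", "1")], [("K", "2"), ("group_index", "0")], [("other", "x")]]

def Spec_per_k_groups (rows : List (List (String × String))) (out : List (Int × List (List (String × String)))) : Prop := out = per_k_groups_alt rows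
instance (rows : List (List (String × String))) (out : List (Int × List (List (String × String)))) : Decidable (Spec_per_k_groups rows out) := by unfold Spec_per_k_groups; infer_instance

-- ===== CLAIM (what is proved, stated in full; the proofs are below) =====
def Claim_equal_per_k_groups : Prop := ∀ (rows : List (List (String × String))), Dom_per_k_groups rows → Pre_per_k_groups rows → Spec_per_k_groups rows (per_k_groups rows)

-- ===== LEMMAS AND PROOFS =====

-- closed form of A's grouping fold: keys in first-appearance order, group c = rows with key c
def pvGroups (key : List (String × String) → Int) (l : List (List (String × String))) :
    List (Int × List (List (String × String))) :=
  (PySem.List.dedup (l.map key)).map (fun c => (c, l.filter (fun r => key r == c)))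

theorem pv_getD_mapform (ks : List Int) (g : Int → List (List (String × String)))
    (k : Int) (d0 : List (List (String × String))) :
    (PySem.Dict.mk (ks.map (fun c => (c, g c)))).getD k d0 = if k ∈ ks then g k else d0 := by
  induction ks with
  | nil => simp [PySem.Dict.getD, PySem.Dict.get?]
  | cons c ks ih =>
    simp only [List.map_cons, PySem.Dict.getD, PySem.Dict.get?_mk_cons] at *
    by_cases h : c = k
    · subst h; simp
    · simp [h, ih, Ne.symm h]

theorem pv_contains_mapform (ks : List Int) (g : Int → List (List (String × String))) (k : Int) :
    (PySem.Dict.mk (ks.map (fun c => (c, g c)))).contains k = decide (k ∈ ks) := by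
  induction ks with
  | nil => simp [PySem.Dict.contains]
  | cons c ks ih =>
    simp only [PySem.Dict.contains, List.map_cons, List.any_cons] at *
    by_cases h : c = k
    · simp [h]
    · simp [h, ih, Ne.symm h]

theorem pv_dedup_append_singleton (xs : List Int) (x : Int) :
    PySem.List.dedup (xs ++ [x]) = if x ∈ xs then PySem.List.dedup xs else PySem.List.dedup xs ++ [x] := by
  simp only [PySem.List.dedup_eq_ofList, PySem.Set.ofList, List.foldl_append, List.foldl_cons,
    List.foldl_nil]
  rw [PySem.Set.add]
  have hc : (List.foldl PySem.Set.add PySem.Set.empty xs).contains x = decide (x ∈ xs) := by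
    have h0 : List.foldl PySem.Set.add PySem.Set.empty xs = PySem.Set.ofList xs := rfl
    rw [h0]
    simp [PySem.Set.contains, PySem.Set.mem_ofList]
  rw [hc]
  by_cases h : x ∈ xs <;> simp [h]

-- A's grouping fold, in closed form
theorem pv_foldA (key : List (String × String) → Int) (l : List (List (String × String))) :
    (l.foldl (fun d r => d.modify (key r) [] (fun t => t ++ [r])) PySem.Dict.empty).items
      = pvGroups key l := by
  induction l using List.reverseRecOn with
  | nil => rfl
  | append_singleton l r ih =>
    rw [List.foldl_append, List.foldl_cons, List.foldl_nil]
    have hdict : (l.foldl (fun d r => d.modify (key r) [] (fun t => t ++ [r])) PySem.Dict.empty)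
        = PySem.Dict.mk ((PySem.List.dedup (l.map key)).map
            (fun c => (c, l.filter (fun r' => key r' == c)))) :=
      PySem.Dict.ext ih
    rw [hdict, PySem.Dict.modify, PySem.Dict.insert, pv_getD_mapform, pv_contains_mapform]
    unfold pvGroups
    rw [List.map_append, List.map_cons, List.map_nil, pv_dedup_append_singleton]
    have hmemdedup : (key r ∈ PySem.List.dedup (l.map key)) ↔ key r ∈ l.map key := by
      simp [PySem.List.dedup_eq_ofList, PySem.Set.mem_ofList]
    simp only [decide_eq_true_eq]
    by_cases h : key r ∈ l.map key
    · rw [if_pos h, if_pos (hmemdedup.2 h), if_pos (hmemdedup.2 h)]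
      dsimp only
      rw [List.map_map]
      refine List.map_congr_left ?_
      intro c _
      by_cases hck : c = key r
      · subst hck; simp
      · simp [hck, Ne.symm hck, List.filter_append]
    · rw [if_neg h, if_neg (fun hm => h (hmemdedup.1 hm)), if_neg (fun hm => h (hmemdedup.1 hm)),
        List.map_append, List.map_cons, List.map_nil]
      dsimp only
      have hfilnil : l.filter (fun r' => key r' == key r) = [] := by
        rw [List.filter_eq_nil_iff]
        intro r' hr'
        simp only [beq_iff_eq]
        exact fun he => h (he ▸ List.mem_map_of_mem hr')
      congr 1
      · refine List.map_congr_left ?_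
        intro c hc
        have hcne : key r ≠ c := by
          intro he
          exact h (by simpa [PySem.List.dedup_eq_ofList, PySem.Set.mem_ofList, he] using hc)
        simp [List.filter_append, hcne]
      · simp [List.filter_append, hfilnil]

-- B's key-collecting fold is exactly dedup of the mapped keys
theorem pv_keys_fold (key : List (String × String) → Int) (l : List (List (String × String))) :
    l.foldl (fun ks r => if key r ∈ ks then ks else ks ++ [key r]) []
      = PySem.List.dedup (l.map key) := by
  induction l using List.reverseRecOn with
  | nil => rfl
  | append_singleton l r ih =>
    rw [List.foldl_append, List.foldl_cons, List.foldl_nil, ih,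
      List.map_append, List.map_cons, List.map_nil, pv_dedup_append_singleton]
    have hmemdedup : (key r ∈ PySem.List.dedup (l.map key)) ↔ key r ∈ l.map key := by
      simp [PySem.List.dedup_eq_ofList, PySem.Set.mem_ofList]
    by_cases h : key r ∈ l.map key
    · simp [h]
    · simp [h]

-- ===== VERDICT (by name: the statement is the Claim_ definition above) =====
theorem per_k_groups_spec : Claim_equal_per_k_groups := by
  intro rows _ _
  simp only [Spec_per_k_groups, per_k_groups, per_k_groups_alt]
  rw [pv_foldA pvKval rows, pv_keys_fold pvKval rows]
  unfold pvGroups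
  rw [List.map_map]
  simp [Function.comp]
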